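-- pv_equiv track=rewrite | github.com/JuNi4/CMS | test.py | BadWordFilter
-- ===== SOURCE A (Python) =====
-- def BadWordFilter(msg):
--     # bad word filter
--     ls = msg.split(' ')
--     for o in BADWORDS:
--         if o in ls:
--             ls[ls.index(o)] = '*'*len(o)
--
--     # Create new message
--     msg = ''
--     for o in ls:
--         msg += o + ' '
--     return msg
--
-- BADWORDS = ['bad']
-- ===== SOURCE B (Python) =====
-- BADWORDS = ['bad']
--
-- def BadWordFilter(msg):
--     words = ['*' * len(w) if w in BADWORDS else w for w in msg.split(' ')]
--     return ''.join(w + ' ' for w in words)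
-- ===== Notes on version B (the rewrite author's own statement) =====
-- stated objective: idiomatic
-- what changed: A single comprehension over the split word list censors each word by membership in BADWORDS, replacing A's loop over BADWORDS with its per-word 'in' test and .index scan; the message is rebuilt with a join instead of repeated string concatenation.
-- intended difference: On messages where a bad word occurs more than once among the space-split words, A censors only the first occurrence (an accident of list.index) and returns e.g. '*** bad ' for 'bad bad', while B censors every occurrence and returns '*** *** ', which is what a bad-word filter is meant to do. — e.g. on BadWordFilter("bad bad"): A returns "*** bad ", B returns "*** *** "
import Mathlib
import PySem

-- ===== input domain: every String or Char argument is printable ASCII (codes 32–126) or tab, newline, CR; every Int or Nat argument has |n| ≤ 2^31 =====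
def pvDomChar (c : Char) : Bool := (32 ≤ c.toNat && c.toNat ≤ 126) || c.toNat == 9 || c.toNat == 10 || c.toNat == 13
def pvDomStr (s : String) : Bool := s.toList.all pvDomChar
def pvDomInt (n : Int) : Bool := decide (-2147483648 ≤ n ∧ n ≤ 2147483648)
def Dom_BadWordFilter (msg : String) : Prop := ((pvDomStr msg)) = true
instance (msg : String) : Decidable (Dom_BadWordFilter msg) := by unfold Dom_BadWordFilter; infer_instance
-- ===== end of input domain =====

-- B censors by a single comprehension over the split word list and rebuilds with a join;
-- on duplicate bad words B censors all occurrences where A censors only the first (see D_). Return value only.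

-- the module constant BADWORDS = ['bad'] (shared by both modules)
def pvBADWORDS : List String := ["bad"]

-- '*' * len(o)  (exact: len(o) ≥ 0, so Python repetition is List.replicate)
def pvStars (o : String) : String := String.ofList (List.replicate o.toList.length '*')

-- ===== PORT A =====
-- body of "for o in BADWORDS: if o in ls: ls[ls.index(o)] = '*'*len(o)"
def pvCensor (ls : List String) (o : String) : List String :=
  if o ∈ ls then
    match PySem.List.index? ls o with
    | some i => ls.set i (pvStars o)
    | none => ls
  else ls

def BadWordFilter (msg : String) : String :=
  let ls := (PySem.Str.split? msg " ").getD []   -- msg.split(' '); sep ≠ '' so split? is some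
  let ls := pvBADWORDS.foldl pvCensor ls
  ls.foldl (fun acc o => acc ++ o ++ " ") ""     -- msg = ''; for o in ls: msg += o + ' '

-- ===== PORT B =====
-- "'*' * len(w) if w in BADWORDS else w"
def pvF (w : String) : String := if w ∈ pvBADWORDS then pvStars w else w

def BadWordFilter_alt (msg : String) : String :=
  let words := ((PySem.Str.split? msg " ").getD []).map pvF
  PySem.Str.join "" (words.map (fun w => w ++ " "))   -- ''.join(w + ' ' for w in words)

-- ===== PRECONDITION & SPEC =====
-- On messages where a bad word occurs more than once among the space-split words, A censors only the
-- first occurrence (an accident of list.index) while B censors every occurrence, which is what a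
-- bad-word filter is meant to do.
def D_BadWordFilter (msg : String) : Prop :=
  2 ≤ (PySem.Chars.splitOn msg.toList [' ']).count "bad".toList
instance (msg : String) : Decidable (D_BadWordFilter msg) := by unfold D_BadWordFilter; infer_instance

def Spec_BadWordFilter (msg : String) (out : String) : Prop :=
  ¬ D_BadWordFilter msg → out = BadWordFilter_alt msg
instance (msg : String) (out : String) : Decidable (Spec_BadWordFilter msg out) := by unfold Spec_BadWordFilter; infer_instance

def pvDiffWitness_BadWordFilter : String := "bad bad"
def pvDiffWitnessOut_BadWordFilter : String × String := ("*** bad ", "*** *** ")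

-- ===== CLAIM (what is proved, stated in full; the proofs are below) =====
def Claim_unchanged_BadWordFilter : Prop := ∀ (msg : String), Dom_BadWordFilter msg → Spec_BadWordFilter msg (BadWordFilter msg)
def Claim_changed_BadWordFilter : Prop := Dom_BadWordFilter (pvDiffWitness_BadWordFilter) ∧ D_BadWordFilter (pvDiffWitness_BadWordFilter) ∧ BadWordFilter (pvDiffWitness_BadWordFilter) = pvDiffWitnessOut_BadWordFilter.1 ∧ BadWordFilter_alt (pvDiffWitness_BadWordFilter) = pvDiffWitnessOut_BadWordFilter.2 ∧ pvDiffWitnessOut_BadWordFilter.1 ≠ pvDiffWitnessOut_BadWordFilter.2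
def Claim_exact_BadWordFilter : Prop := ∀ (msg : String), Dom_BadWordFilter msg → D_BadWordFilter msg → BadWordFilter msg ≠ BadWordFilter_alt msg

-- ===== LEMMAS AND PROOFS =====

-- the port's split, viewed as character lists, is PySem.Chars.splitOn (the form D_ is stated in)
lemma split_bridge (msg : String) :
    ((PySem.Str.split? msg " ").getD []).map String.toList = PySem.Chars.splitOn msg.toList [' '] := by
  have h : (" " : String).toList = [' '] := rfl
  rw [PySem.Str.split?, h, PySem.Chars.split?]
  simp [List.map_map, Function.comp_def]

lemma count_bridge (msg : String) :
    PySem.List.count ((PySem.Str.split? msg " ").getD []) "bad"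
      = (PySem.Chars.splitOn msg.toList [' ']).count "bad".toList := by
  rw [PySem.List.count_eq, ← split_bridge msg,
    List.count_map_of_injective _ _ (fun a b h => String.toList_inj.mp h)]

-- when no word is "bad", B's comprehension changes nothing
lemma map_f_skip (ls : List String) (h : ∀ w ∈ ls, w ≠ "bad") : ls.map pvF = ls := by
  induction ls with
  | nil => rfl
  | cons w ws ih =>
    have hw : w ≠ "bad" := h w (by simp)
    simp [pvF, pvBADWORDS, hw, ih (fun x hx => h x (by simp [hx]))]

lemma set_append_cons (pre suf : List String) (x y : String) :
    (pre ++ x :: suf).set pre.length y = pre ++ y :: suf := by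
  induction pre with
  | nil => simp
  | cons p ps ih => simp [ih]

-- A's pass replaces exactly the FIRST "bad": a decomposition around it
lemma censor_decomp (ls : List String) (hmem : "bad" ∈ ls) :
    ∃ pre suf, ls = pre ++ "bad" :: suf ∧ "bad" ∉ pre ∧
      pvBADWORDS.foldl pvCensor ls = pre ++ pvStars "bad" :: suf := by
  obtain ⟨k, hk⟩ := Option.isSome_iff_exists.mp
    ((PySem.List.index?_isSome_iff ls "bad").mpr hmem)
  obtain ⟨pre, suf, hdec, hlen, hpre⟩ := (PySem.List.index?_eq_some_iff ls "bad" k).mp hk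
  refine ⟨pre, suf, hdec, hpre, ?_⟩
  subst hdec
  have hfold : pvBADWORDS.foldl pvCensor (pre ++ "bad" :: suf)
      = pvCensor (pre ++ "bad" :: suf) "bad" := by simp [pvBADWORDS]
  rw [hfold]
  simp only [pvCensor, if_pos hmem, hk, ← hlen, set_append_cons]

-- with at most one occurrence of "bad", A's first-occurrence replacement equals B's comprehension
lemma censor_eq (ls : List String) (h : List.count "bad" ls ≤ 1) :
    ls.map pvF = pvBADWORDS.foldl pvCensor ls := by
  by_cases hmem : "bad" ∈ ls
  · obtain ⟨pre, suf, hdec, hpre, hA⟩ := censor_decomp ls hmem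
    rw [hA]
    subst hdec
    have hsuf : "bad" ∉ suf := by
      intro hs
      have h2 : 2 ≤ List.count "bad" (pre ++ "bad" :: suf) := by
        simp only [List.count_append, List.count_cons_self]
        have := List.one_le_count_iff.mpr hs
        omega
      omega
    rw [List.map_append, List.map_cons,
        map_f_skip pre (fun w hw => by rintro rfl; exact hpre hw),
        map_f_skip suf (fun w hw => by rintro rfl; exact hsuf hw)]
    simp [pvF, pvBADWORDS]
  · have hfold : pvBADWORDS.foldl pvCensor ls = pvCensor ls "bad" := by simp [pvBADWORDS]
    rw [hfold]
    have hA : pvCensor ls "bad" = ls := by simp [pvCensor, hmem]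
    rw [hA, map_f_skip ls (fun w hw => by rintro rfl; exact hmem hw)]

-- Chars.join with empty separator is flatten
lemma join_nil_flatten (l : List (List Char)) :
    PySem.Chars.join [] l = l.flatten := by
  induction l with
  | nil => rfl
  | cons x xs ih =>
    cases xs with
    | nil => simp [PySem.Chars.join_singleton]
    | cons y r =>
      rw [PySem.Chars.join_cons_cons, ih]
      simp

-- A's accumulation loop, at the level of character lists
lemma rebuild_toList (out : List String) :
    (out.foldl (fun acc o => acc ++ o ++ " ") "").toList
      = (out.map (fun w => w.toList ++ [' '])).flatten := by
  have key : ∀ (l : List String) (acc : String),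
      (l.foldl (fun acc o => acc ++ o ++ " ") acc).toList
        = acc.toList ++ (l.map (fun w => w.toList ++ [' '])).flatten := by
    intro l
    induction l with
    | nil => simp
    | cons w ws ih => intro acc; simp [ih]
  simpa using key out ""

-- A's accumulation loop equals B's join
lemma rebuild_eq (out : List String) :
    out.foldl (fun acc o => acc ++ o ++ " ") "" = PySem.Str.join "" (out.map (fun w => w ++ " ")) := by
  apply String.toList_inj.mp
  rw [rebuild_toList, PySem.Str.toList_join]
  have h0 : ("" : String).toList = [] := rfl
  rw [h0, join_nil_flatten]
  simp [Function.comp_def]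

-- number of '*' characters in the rebuilt message = sum over the words
lemma rebuild_starcount (out : List String) :
    (out.foldl (fun acc o => acc ++ o ++ " ") "").toList.count '*'
      = (out.map (fun w => w.toList.count '*')).sum := by
  rw [rebuild_toList]
  induction out with
  | nil => rfl
  | cons w ws ih =>
    simp only [List.map_cons, List.flatten_cons, List.count_append, List.sum_cons, ih]
    have : List.count '*' [' '] = 0 := rfl
    simp [this]

lemma star_pvF_ge (w : String) : w.toList.count '*' ≤ (pvF w).toList.count '*' := by
  by_cases h : w = "bad"
  · subst h; decide
  · simp [pvF, pvBADWORDS, h]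

lemma starsum_map_le (l : List String) :
    (l.map (fun w => w.toList.count '*')).sum ≤ ((l.map pvF).map (fun w => w.toList.count '*')).sum := by
  induction l with
  | nil => exact le_refl _
  | cons w ws ih =>
    simp only [List.map_cons, List.sum_cons]
    exact Nat.add_le_add (star_pvF_ge w) ih

lemma starsum_map_lt (l : List String) (h : "bad" ∈ l) :
    (l.map (fun w => w.toList.count '*')).sum < ((l.map pvF).map (fun w => w.toList.count '*')).sum := by
  induction l with
  | nil => cases h
  | cons w ws ih =>
    simp only [List.map_cons, List.sum_cons]
    by_cases hw : w = "bad"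
    · subst hw
      exact Nat.add_lt_add_of_lt_of_le (by decide) (starsum_map_le ws)
    · have hmem : "bad" ∈ ws := by
        cases h with
        | head => exact absurd rfl hw
        | tail _ h => exact h
      have hfw : pvF w = w := by simp [pvF, pvBADWORDS, hw]
      rw [hfw]
      exact Nat.add_lt_add_left (ih hmem) _

-- ===== VERDICT (by name: the statements are the Claim_ definitions above) =====
theorem BadWordFilter_spec : Claim_unchanged_BadWordFilter := by
  intro msg _ hnd
  unfold D_BadWordFilter at hnd
  rw [← count_bridge msg, PySem.List.count_eq] at hnd
  show (pvBADWORDS.foldl pvCensor ((PySem.Str.split? msg " ").getD [])).foldl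
        (fun acc o => acc ++ o ++ " ") ""
      = PySem.Str.join ""
          ((((PySem.Str.split? msg " ").getD []).map pvF).map (fun w => w ++ " "))
  rw [← censor_eq _ (by omega), rebuild_eq]

theorem BadWordFilter_changed : Claim_changed_BadWordFilter := by
  unfold Claim_changed_BadWordFilter; decide

theorem BadWordFilter_tight : Claim_exact_BadWordFilter := by
  intro msg _ hD
  unfold D_BadWordFilter at hD
  rw [← count_bridge msg, PySem.List.count_eq] at hD
  have hmem : "bad" ∈ (PySem.Str.split? msg " ").getD [] := List.one_le_count_iff.mp (by omega)
  obtain ⟨pre, suf, hdec, hpre, hA⟩ := censor_decomp _ hmem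
  have hsuf : "bad" ∈ suf := by
    by_contra hn
    rw [hdec] at hD
    simp only [List.count_append, List.count_cons_self,
      List.count_eq_zero.mpr hpre, List.count_eq_zero.mpr hn] at hD
    omega
  intro heq
  have hBA : BadWordFilter msg = (pre ++ pvStars "bad" :: suf).foldl (fun acc o => acc ++ o ++ " ") "" := by
    show (pvBADWORDS.foldl pvCensor ((PySem.Str.split? msg " ").getD [])).foldl
          (fun acc o => acc ++ o ++ " ") "" = _
    rw [hA]
  have hBB : BadWordFilter_alt msg
      = ((pre ++ "bad" :: suf).map pvF).foldl (fun acc o => acc ++ o ++ " ") "" := by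
    show PySem.Str.join ""
          ((((PySem.Str.split? msg " ").getD []).map pvF).map (fun w => w ++ " ")) = _
    rw [hdec, rebuild_eq]
  rw [hBA, hBB] at heq
  have hc := congrArg (fun s : String => s.toList.count '*') heq
  simp only [rebuild_starcount] at hc
  simp only [List.map_append, List.map_cons, List.sum_append, List.sum_cons,
      map_f_skip pre (fun w hw => by rintro rfl; exact hpre hw)] at hc
  have hstars : (pvStars "bad").toList.count '*' = (pvF "bad").toList.count '*' := by decide
  rw [hstars] at hc
  have hlt := starsum_map_lt suf hsuf
  omega
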